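-- pv_equiv track=rewrite | github.com/paulphys/lichess-blunders | data.py | time_to_int
-- ===== SOURCE A (Python) =====
-- def time_to_int(timestring):
--     timeint = 0
--     t = timestring.split(":")
--     t.reverse()
--     mult = 1
--     for i in t:
--         timeint += mult*int(i)
--         mult *= 60
--     return timeint
-- ===== SOURCE B (Python) =====
-- def time_to_int(timestring):
--     total = 0
--     for part in timestring.split(":"):
--         total = total * 60 + int(part)
--     return total
-- ===== Notes on version B (the rewrite author's own statement) =====
-- stated objective: simpler
-- what changed: Left-to-right Horner fold (total = total*60 + int(part)) replaces A's reverse() plus a separate running multiplier accumulator.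
import Mathlib
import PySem

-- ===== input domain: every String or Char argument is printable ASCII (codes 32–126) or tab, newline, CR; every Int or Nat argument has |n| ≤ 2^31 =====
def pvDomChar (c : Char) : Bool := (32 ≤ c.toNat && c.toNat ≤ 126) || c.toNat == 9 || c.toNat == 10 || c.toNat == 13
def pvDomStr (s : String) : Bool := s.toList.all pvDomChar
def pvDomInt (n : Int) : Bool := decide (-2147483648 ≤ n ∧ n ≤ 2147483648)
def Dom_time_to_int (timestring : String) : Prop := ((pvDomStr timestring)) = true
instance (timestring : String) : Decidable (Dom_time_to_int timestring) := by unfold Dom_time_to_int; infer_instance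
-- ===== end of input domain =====

-- B replaces A's reverse() + separate multiplier accumulator by a left-to-right Horner fold; same value, simpler.

-- ===== PORT A =====
-- t.reverse(); for i in t: timeint += mult*int(i); mult *= 60
def time_to_int (timestring : String) : Int :=
  let t := ((PySem.Str.split? timestring ":").getD []).reverse
  (t.foldl (fun (st : Int × Int) i => (st.1 + st.2 * (PySem.Int.ofStr? i).getD 0, st.2 * 60)) (0, 1)).1

-- ===== PORT B =====
-- for part in parts: total = total*60 + int(part)
def time_to_int_alt (timestring : String) : Int :=
  ((PySem.Str.split? timestring ":").getD []).foldl (fun total part => total * 60 + (PySem.Int.ofStr? part).getD 0) 0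

-- ===== PRECONDITION & SPEC =====
-- Pre_ excludes exactly the inputs where int() raises ValueError (some ':'-separated token is not an int literal); both A and B raise there.
def Pre_time_to_int (timestring : String) : Prop :=
  ∀ tok ∈ (PySem.Str.split? timestring ":").getD [], (PySem.Int.ofStr? tok).isSome
instance (timestring : String) : Decidable (Pre_time_to_int timestring) := by unfold Pre_time_to_int; infer_instance
def pvWitness_time_to_int : String := "1:02:03"

def Spec_time_to_int (timestring : String) (out : Int) : Prop := out = time_to_int_alt timestring
instance (timestring : String) (out : Int) : Decidable (Spec_time_to_int timestring out) := by unfold Spec_time_to_int; infer_instance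

-- ===== CLAIM (what is proved, stated in full; the proofs are below) =====
def Claim_equal_time_to_int : Prop := ∀ (timestring : String), Dom_time_to_int timestring → Pre_time_to_int timestring → Spec_time_to_int timestring (time_to_int timestring)

-- ===== LEMMAS AND PROOFS =====

-- A's accumulator pair, characterised: first component = acc + mult * foldr Horner.
theorem pv_foldA (l : List String) (acc mult : Int) :
    (l.foldl (fun (st : Int × Int) i => (st.1 + st.2 * (PySem.Int.ofStr? i).getD 0, st.2 * 60)) (acc, mult)).1
      = acc + mult * l.foldr (fun p r => (PySem.Int.ofStr? p).getD 0 + 60 * r) 0 := by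
  induction l generalizing acc mult with
  | nil => simp
  | cons x xs ih => simp [List.foldl, List.foldr, ih]; ring

-- ===== VERDICT (by name: the statement is the Claim_ definition above) =====
theorem time_to_int_spec : Claim_equal_time_to_int := by
  intro s _ _
  unfold Spec_time_to_int time_to_int time_to_int_alt
  rw [pv_foldA, List.foldr_reverse]
  have : ∀ (l : List String) (a : Int),
      l.foldl (fun r p => (PySem.Int.ofStr? p).getD 0 + 60 * r) a
        = l.foldl (fun total part => total * 60 + (PySem.Int.ofStr? part).getD 0) a := by
    intro l
    induction l with
    | nil => intro a; rfl
    | cons x xs ih => intro a; simp [List.foldl, ih]; ring_nf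
  simp [this]
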